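-- pv_equiv track=rewrite | github.com/JurjV/University-projects | Year 1/Fundamentals of programming/Assignment3/main.py | generate_average_case_list
-- ===== SOURCE A (Python) =====
-- def generate_average_case_list(n):
--     l = [None] * n
--     for i in range(n):
--         if i < n // 2:
--             l[i] = i + 1
--         else:
--             l[i] = n // 2 + n - i
--     return l
-- ===== SOURCE B (Python) =====
-- def generate_average_case_list(n):
--     # ascending run 1..n//2, then descending run n..n//2+1
--     return list(range(1, n // 2 + 1)) + list(range(n, n // 2, -1))
-- ===== Notes on version B (the rewrite author's own statement) =====
-- stated objective: simpler
-- what changed: Replaced the per-index loop with a conditional over a None-filled list by direct concatenation of two range objects (ascending 1..n//2, then descending n..n//2+1).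
import Mathlib
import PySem

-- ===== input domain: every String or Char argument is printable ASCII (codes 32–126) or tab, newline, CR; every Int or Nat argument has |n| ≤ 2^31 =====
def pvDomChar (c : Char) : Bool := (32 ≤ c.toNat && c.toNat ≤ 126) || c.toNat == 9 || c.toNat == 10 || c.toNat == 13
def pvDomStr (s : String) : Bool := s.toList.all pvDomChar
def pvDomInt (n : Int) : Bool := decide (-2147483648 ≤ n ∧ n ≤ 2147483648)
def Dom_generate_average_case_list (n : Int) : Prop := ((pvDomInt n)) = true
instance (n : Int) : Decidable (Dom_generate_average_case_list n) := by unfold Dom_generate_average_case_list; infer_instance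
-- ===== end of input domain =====

-- B builds the same list as the concatenation of two ranges instead of A's per-index loop; objective: simpler.

-- ===== PORT A =====
-- l = [None] * n : every cell is overwritten before return (each i in range(n) is
-- assigned), so the None placeholder is represented exactly by an Int placeholder 0.
-- l[i] = v with 0 ≤ i < len l is List.set i.toNat v (i comes from range(n), so 0 ≤ i).
def generate_average_case_list (n : Int) : List Int :=
  (PySem.List.pyRange 0 n 1).foldl
    (fun l i =>
      if i < PySem.Int.floordiv n 2 then l.set i.toNat (i + 1)
      else l.set i.toNat (PySem.Int.floordiv n 2 + n - i))
    (List.replicate n.toNat (0 : Int))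

-- ===== PORT B =====
def generate_average_case_list_alt (n : Int) : List Int :=
  PySem.List.pyRange 1 (PySem.Int.floordiv n 2 + 1) 1 ++
    PySem.List.pyRange n (PySem.Int.floordiv n 2) (-1)

-- ===== PRECONDITION & SPEC =====
def Spec_generate_average_case_list (n : Int) (out : List Int) : Prop := out = generate_average_case_list_alt n
instance (n : Int) (out : List Int) : Decidable (Spec_generate_average_case_list n out) := by unfold Spec_generate_average_case_list; infer_instance

-- ===== CLAIM (what is proved, stated in full; the proofs are below) =====
def Claim_equal_generate_average_case_list : Prop := ∀ (n : Int), Dom_generate_average_case_list n → Spec_generate_average_case_list n (generate_average_case_list n)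

-- ===== LEMMAS AND PROOFS =====

-- taking one past a freshly set cell appends that value to the prefix
lemma take_succ_set (l : List Int) (k : Nat) (x : Int) (hk : k < l.length) :
    (l.set k x).take (k + 1) = l.take k ++ [x] := by
  apply List.ext_getElem
  · simp [List.length_take]; omega
  · intro i h1 h2
    simp only [List.length_take, List.length_set] at h1
    rcases Nat.lt_or_ge i k with hik | hik
    · rw [List.getElem_take, List.getElem_set_ne (by omega)]
      rw [List.getElem_append_left (by simp [List.length_take]; omega)]
      simp [List.getElem_take]
    · have : i = k := by omega
      subst this
      rw [List.getElem_take, List.getElem_set_self]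
      have hti : (List.take i l).length = i := List.length_take_of_le (Nat.le_of_lt hk)
      rw [List.getElem_append_right (by omega)]
      simp [hti]

-- folding index-wise writes g i over range a..b onto a list of length b
-- leaves the untouched prefix and materialises the map of g over the range
lemma foldl_set_range (g : Int → Int) (b : Int) :
    ∀ (m : Nat) (a : Int), 0 ≤ a → b - a ≤ (m : Int) → ∀ (l : List Int), l.length = b.toNat →
      (PySem.List.pyRange a b 1).foldl (fun l i => l.set i.toNat (g i)) l
        = l.take a.toNat ++ (PySem.List.pyRange a b 1).map g := by
  intro m
  induction m with
  | zero =>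
    intro a ha hm l hl
    have hab : b ≤ a := by omega
    rw [PySem.List.pyRange_one_eq_nil hab]
    simp [hl]
    omega
  | succ m ih =>
    intro a ha hm l hl
    rcases lt_or_ge a b with hab | hab
    · rw [PySem.List.pyRange_one_cons hab]
      simp only [List.foldl_cons, List.map_cons]
      rw [ih (a + 1) (by omega) (by omega) _ (by simpa using hl)]
      have hkl : a.toNat < l.length := by omega
      have h1 : (a + 1).toNat = a.toNat + 1 := by omega
      rw [h1, take_succ_set l a.toNat (g a) hkl]
      simp
    · rw [PySem.List.pyRange_one_eq_nil hab]
      simp [hl]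
      omega

-- the ascending half: mapping the then-branch over range 0..n//2 is range 1..n//2+1
lemma asc_half (n : Int) (g : Int → Int) (hg : ∀ i, 0 ≤ i → i < PySem.Int.floordiv n 2 → g i = i + 1) :
    (PySem.List.pyRange 0 (PySem.Int.floordiv n 2) 1).map g
      = PySem.List.pyRange 1 (PySem.Int.floordiv n 2 + 1) 1 := by
  rw [PySem.List.pyRange_one 0, PySem.List.pyRange_one 1, List.map_map]
  have hlen : (PySem.Int.floordiv n 2 - 0).toNat = (PySem.Int.floordiv n 2 + 1 - 1).toNat := by omega
  rw [hlen]
  apply List.map_congr_left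
  intro k hk
  simp only [List.mem_range] at hk
  have : (k : Int) < PySem.Int.floordiv n 2 := by omega
  simp [hg k (by omega) (by simpa using this)]
  omega

-- the descending half: mapping the else-branch over range n//2..n is range n..n//2 step -1
lemma desc_half (n : Int) (g : Int → Int)
    (hg : ∀ i, PySem.Int.floordiv n 2 ≤ i → i < n → g i = PySem.Int.floordiv n 2 + n - i) :
    (PySem.List.pyRange (PySem.Int.floordiv n 2) n 1).map g
      = PySem.List.pyRange n (PySem.Int.floordiv n 2) (-1) := by
  rw [PySem.List.pyRange_one, PySem.List.pyRange_neg_one, List.map_map]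
  apply List.map_congr_left
  intro k hk
  simp only [List.mem_range] at hk
  have h1 : (k : Int) < n - PySem.Int.floordiv n 2 := by omega
  simp only [Function.comp_apply]
  rw [hg (PySem.Int.floordiv n 2 + k) (by omega) (by omega)]
  omega

-- ===== VERDICT (by name: the statement is the Claim_ definition above) =====
theorem generate_average_case_list_spec : Claim_equal_generate_average_case_list := by
  intro n _
  unfold Spec_generate_average_case_list generate_average_case_list generate_average_case_list_alt
  have hfd : PySem.Int.floordiv n 2 = n / 2 := PySem.Int.floordiv_eq_ediv_of_pos (by omega)
  rcases (by omega : n ≤ 0 ∨ 0 < n) with hn | hn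
  · rw [PySem.List.pyRange_one_eq_nil hn,
        PySem.List.pyRange_one_eq_nil (by rw [hfd]; omega),
        PySem.List.pyRange_neg_one_eq_nil (by rw [hfd]; omega)]
    simp [List.replicate_eq_nil_iff]
    omega
  · set g : Int → Int := fun i =>
      if i < PySem.Int.floordiv n 2 then i + 1 else PySem.Int.floordiv n 2 + n - i with hgdef
    have hfold :
        (PySem.List.pyRange 0 n 1).foldl (fun l i => l.set i.toNat (g i))
            (List.replicate n.toNat (0 : Int))
          = (PySem.List.pyRange 0 n 1).map g := by
      have := foldl_set_range g n n.toNat 0 (le_refl 0) (by omega)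
        (List.replicate n.toNat (0 : Int)) (by simp)
      simpa using this
    have hsplit : PySem.List.pyRange 0 n 1
        = PySem.List.pyRange 0 (PySem.Int.floordiv n 2) 1
          ++ PySem.List.pyRange (PySem.Int.floordiv n 2) n 1 :=
      PySem.List.pyRange_one_append 0 (PySem.Int.floordiv n 2) n (by rw [hfd]; omega) (by rw [hfd]; omega)
    have hfun : (fun (l : List Int) i =>
        if i < PySem.Int.floordiv n 2 then l.set i.toNat (i + 1)
        else l.set i.toNat (PySem.Int.floordiv n 2 + n - i))
        = fun (l : List Int) i => l.set i.toNat (g i) := by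
      funext l i
      rw [hgdef]
      simp only [apply_ite (l.set i.toNat)]
    calc (PySem.List.pyRange 0 n 1).foldl
            (fun l i => if i < PySem.Int.floordiv n 2 then l.set i.toNat (i + 1)
                        else l.set i.toNat (PySem.Int.floordiv n 2 + n - i))
            (List.replicate n.toNat (0 : Int))
        = (PySem.List.pyRange 0 n 1).foldl (fun l i => l.set i.toNat (g i))
            (List.replicate n.toNat (0 : Int)) := by rw [hfun]
      _ = (PySem.List.pyRange 0 n 1).map g := hfold
      _ = (PySem.List.pyRange 0 (PySem.Int.floordiv n 2) 1).map g
            ++ (PySem.List.pyRange (PySem.Int.floordiv n 2) n 1).map g := by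
          rw [hsplit, List.map_append]
      _ = PySem.List.pyRange 1 (PySem.Int.floordiv n 2 + 1) 1
            ++ PySem.List.pyRange n (PySem.Int.floordiv n 2) (-1) := by
          rw [asc_half n g (by intro i _ h; simp only [hgdef]; rw [if_pos h]),
              desc_half n g (by intro i h1 _; simp only [hgdef]; rw [if_neg (not_lt.mpr h1)])]
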